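-- pv_equiv track=rewrite | github.com/VictorMaxWang/smartchildcare-agent | backend/app/services/high_risk_consultation_contract.py | _resolve_evidence_category
-- ===== SOURCE A (Python) =====
-- from typing import Any
--
-- def _as_text(value: Any) -> str:
--     return str(value).strip() if value is not None else ""
--
-- def _coalesce_text(*values: Any, fallback: str = "") -> str:
--     for value in values:
--         text = _as_text(value)
--         if text:
--             return text
--     return fallback
--
-- def _resolve_evidence_category(
--     source_type: str,
--     supports: list[dict[str, str]],
-- ) -> str:
--     if source_type == "guardian_feedback":
--         return "family_communication"
--     if source_type == "trend":
--         return "development_support"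
--     if source_type in {"memory_snapshot", "consultation_history"}:
--         return "daily_care"
--     if any(_coalesce_text(item.get("targetId")).startswith("action:home:") for item in supports):
--         return "family_communication"
--     if any(_coalesce_text(item.get("targetId")).startswith("action:followup:") for item in supports):
--         return "development_support"
--     if any(_coalesce_text(item.get("targetId")).startswith("action:school:") for item in supports):
--         return "daily_care"
--     return "risk_control"
-- ===== SOURCE B (Python) =====
-- def _resolve_evidence_category(source_type, supports):
--     if source_type == "guardian_feedback":
--         return "family_communication"
--     if source_type == "trend":
--         return "development_support"
--     if source_type in ("memory_snapshot", "consultation_history"):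
--         return "daily_care"
--     home = followup = school = False
--     for item in supports:
--         t = (item.get("targetId") or "").strip()
--         home = home or t.startswith("action:home:")
--         followup = followup or t.startswith("action:followup:")
--         school = school or t.startswith("action:school:")
--     if home:
--         return "family_communication"
--     if followup:
--         return "development_support"
--     if school:
--         return "daily_care"
--     return "risk_control"
-- ===== Notes on version B (the rewrite author's own statement) =====
-- stated objective: simpler
-- what changed: Replaces A's three separate any(...) scans over supports (and the _as_text/_coalesce_text helper chain) with a single pass that records three booleans per prefix, deciding by prefix priority after the scan.
import Mathlib
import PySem

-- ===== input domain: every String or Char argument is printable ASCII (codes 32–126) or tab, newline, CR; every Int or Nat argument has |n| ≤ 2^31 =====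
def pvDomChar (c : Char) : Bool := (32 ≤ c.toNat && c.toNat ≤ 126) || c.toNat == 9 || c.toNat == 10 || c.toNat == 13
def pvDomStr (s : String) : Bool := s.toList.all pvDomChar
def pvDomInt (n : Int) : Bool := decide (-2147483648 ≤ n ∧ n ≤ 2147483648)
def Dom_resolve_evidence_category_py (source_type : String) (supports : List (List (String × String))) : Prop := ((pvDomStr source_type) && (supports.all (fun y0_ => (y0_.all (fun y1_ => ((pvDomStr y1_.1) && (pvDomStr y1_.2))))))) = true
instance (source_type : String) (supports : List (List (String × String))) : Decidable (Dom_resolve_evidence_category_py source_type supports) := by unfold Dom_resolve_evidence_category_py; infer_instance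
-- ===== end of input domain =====

-- B replaces three any() scans by one pass collecting three booleans, deciding by prefix priority after the scan (objective: simpler).
-- ===== PORT A =====
-- _as_text(value): str(value).strip() if value is not None else ""  (values here are strings)
def pvAsText (v : Option String) : String :=
  match v with
  | some s => PySem.Str.strip s
  | none => ""

-- _coalesce_text(*values): first nonempty _as_text, else fallback "" (called with one value)
def pvCoalesceText (vs : List (Option String)) : String :=
  match vs with
  | [] => ""
  | v :: rest =>
    let t := pvAsText v
    if t ≠ "" then t else pvCoalesceText rest

def resolve_evidence_category_py (source_type : String) (supports : List (List (String × String))) : String :=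
  if source_type = "guardian_feedback" then "family_communication"
  else if source_type = "trend" then "development_support"
  else if source_type = "memory_snapshot" ∨ source_type = "consultation_history" then "daily_care"
  else if supports.any (fun item =>
      PySem.Str.startswith (pvCoalesceText [(PySem.Dict.mk item).get? "targetId"]) "action:home:") then
    "family_communication"
  else if supports.any (fun item =>
      PySem.Str.startswith (pvCoalesceText [(PySem.Dict.mk item).get? "targetId"]) "action:followup:") then
    "development_support"
  else if supports.any (fun item =>
      PySem.Str.startswith (pvCoalesceText [(PySem.Dict.mk item).get? "targetId"]) "action:school:") then
    "daily_care"
  else "risk_control"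

-- ===== PORT B =====
-- B: one pass over supports collecting three booleans, then decide by prefix priority.
def pvTgt (item : List (String × String)) : String :=
  PySem.Str.strip (((PySem.Dict.mk item).get? "targetId").getD "")

def resolve_evidence_category_py_alt (source_type : String) (supports : List (List (String × String))) : String :=
  if source_type = "guardian_feedback" then "family_communication"
  else if source_type = "trend" then "development_support"
  else if source_type = "memory_snapshot" ∨ source_type = "consultation_history" then "daily_care"
  else
    let seen := supports.foldl (fun (acc : Bool × Bool × Bool) item =>
      let t := pvTgt item
      (acc.1 || PySem.Str.startswith t "action:home:",
       acc.2.1 || PySem.Str.startswith t "action:followup:",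
       acc.2.2 || PySem.Str.startswith t "action:school:")) (false, false, false)
    if seen.1 then "family_communication"
    else if seen.2.1 then "development_support"
    else if seen.2.2 then "daily_care"
    else "risk_control"

-- ===== PRECONDITION & SPEC =====
def Spec_resolve_evidence_category_py (source_type : String) (supports : List (List (String × String))) (out : String) : Prop := out = resolve_evidence_category_py_alt source_type supports
instance (source_type : String) (supports : List (List (String × String))) (out : String) : Decidable (Spec_resolve_evidence_category_py source_type supports out) := by unfold Spec_resolve_evidence_category_py; infer_instance

-- ===== CLAIM (what is proved, stated in full; the proofs are below) =====
def Claim_equal_resolve_evidence_category_py : Prop := ∀ (source_type : String) (supports : List (List (String × String))), Dom_resolve_evidence_category_py source_type supports → Spec_resolve_evidence_category_py source_type supports (resolve_evidence_category_py source_type supports)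

-- ===== LEMMAS AND PROOFS =====

-- ===== VERDICT (by name: the statement is the Claim_ definition above) =====
-- per-item text: A's _coalesce_text([item.get("targetId")]) equals B's strip(get or "")
theorem pvCoalesce_eq_tgt (item : List (String × String)) :
    pvCoalesceText [(PySem.Dict.mk item).get? "targetId"] = pvTgt item := by
  unfold pvCoalesceText pvTgt pvAsText
  cases h : (PySem.Dict.mk item).get? "targetId" with
  | none => decide
  | some s =>
    simp only [Option.getD]
    by_cases he : PySem.Str.strip s = "" <;> simp [pvCoalesceText, he]

-- the single fold computes the three any-scans
theorem pvFold_eq_any (p q r : List (String × String) → Bool)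
    (l : List (List (String × String))) (a b c : Bool) :
    l.foldl (fun (acc : Bool × Bool × Bool) item =>
      (acc.1 || p item, acc.2.1 || q item, acc.2.2 || r item)) (a, b, c)
    = (a || l.any p, b || l.any q, c || l.any r) := by
  induction l generalizing a b c with
  | nil => simp
  | cons x xs ih => simp [List.foldl_cons, ih, Bool.or_assoc]

theorem resolve_evidence_category_py_spec : Claim_equal_resolve_evidence_category_py := by
  intro source_type supports _
  unfold Spec_resolve_evidence_category_py resolve_evidence_category_py resolve_evidence_category_py_alt
  by_cases h1 : source_type = "guardian_feedback"
  · simp [h1]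
  by_cases h2 : source_type = "trend"
  · simp [h2]
  by_cases h3 : source_type = "memory_snapshot" ∨ source_type = "consultation_history"
  · simp [h3]
  simp only [if_neg h1, if_neg h2, if_neg h3, pvCoalesce_eq_tgt]
  rw [pvFold_eq_any (fun item => PySem.Str.startswith (pvTgt item) "action:home:")
      (fun item => PySem.Str.startswith (pvTgt item) "action:followup:")
      (fun item => PySem.Str.startswith (pvTgt item) "action:school:")]
  simp
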